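-- pv_equiv track=rewrite | github.com/punkryn/problem-solving | 1418-display-table-of-food-orders-in-a-restaurant/1418-display-table-of-food-orders-in-a-restaurant.py | displayTable
-- ===== SOURCE A (Python) =====
-- from typing import List
--
-- def displayTable(orders: List[List[str]]) -> List[List[str]]:
--     foods_set = set()
--     tables = dict()
--
--     for _, table, food in orders:
--         if table not in tables:
--             tables[table] = dict()
--
--         if food not in tables[table]:
--             tables[table][food] = 0
--
--         foods_set.add(food)
--         tables[table][food] += 1
--
--     sorted_foods_set = sorted(foods_set)
--     answer = []
--     answer.append(["Table"] + sorted_foods_set)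
--
--     for table in sorted(tables, key=lambda x:int(x)):
--         cur = [table]
--
--         for food in sorted_foods_set:
--             if food not in tables[table]:
--                 cur.append("0")
--                 continue
--
--             cur.append(str(tables[table][food]))
--
--         answer.append(cur)
--
--     return answer
-- ===== SOURCE B (Python) =====
-- def displayTable(orders):
--     foods = sorted({f for _, _, f in orders})
--     tables = sorted(dict.fromkeys(t for _, t, _ in orders), key=int)
--     return [["Table"] + foods] + [
--         [t] + [str(sum(1 for _, t2, f2 in orders if t2 == t and f2 == f)) for f in foods]
--         for t in tables
--     ]
-- ===== Notes on version B (the rewrite author's own statement) =====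
-- stated objective: simpler
-- what changed: B maintains no counts at all: it derives the sorted food/table axes in staged passes and recomputes every cell by directly counting the matching orders with sum(), instead of A's single pass that incrementally maintains a nested table->food->count dict with init branches.
import Mathlib
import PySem

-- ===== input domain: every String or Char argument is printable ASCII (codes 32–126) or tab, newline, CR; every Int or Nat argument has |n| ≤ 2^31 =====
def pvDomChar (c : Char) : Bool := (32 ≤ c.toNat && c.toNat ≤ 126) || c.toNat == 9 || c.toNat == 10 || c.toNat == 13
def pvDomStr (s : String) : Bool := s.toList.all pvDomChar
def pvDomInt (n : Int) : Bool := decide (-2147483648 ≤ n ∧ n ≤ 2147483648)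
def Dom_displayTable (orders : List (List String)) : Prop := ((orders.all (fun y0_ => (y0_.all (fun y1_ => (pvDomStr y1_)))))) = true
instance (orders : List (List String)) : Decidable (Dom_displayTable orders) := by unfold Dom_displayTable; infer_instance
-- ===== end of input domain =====

-- B keeps no counts at all: it derives the sorted food/table axes in staged passes and recomputes
-- every cell by directly counting the matching orders, instead of A's incrementally maintained
-- nested table->food->count dict; same return value (simpler, not faster).

-- ===== PORT A =====
-- A's three statements updating the nested 'tables' dict for one order (init table, init food, += 1)
def aUpdate (tables : PySem.Dict String (PySem.Dict String Int)) (table food : String) :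
    PySem.Dict String (PySem.Dict String Int) :=
  let tables := if tables.contains table then tables else tables.insert table PySem.Dict.empty
  let tables := if (tables.getD table PySem.Dict.empty).contains food then tables
    else tables.insert table ((tables.getD table PySem.Dict.empty).insert food 0)
  let inner := tables.getD table PySem.Dict.empty
  tables.insert table (inner.insert food (inner.getD food 0 + 1))

-- one iteration of A's order loop (unpacking '_, table, food'; a row of another length raises in Python, excluded by Pre_)
def aStep (st : PySem.Set String × PySem.Dict String (PySem.Dict String Int))
    (row : List String) : PySem.Set String × PySem.Dict String (PySem.Dict String Int) :=
  match row with
  | [_, table, food] => (PySem.Set.add st.1 food, aUpdate st.2 table food)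
  | _ => st

def displayTable (orders : List (List String)) : List (List String) :=
  let st := orders.foldl aStep (PySem.Set.empty, PySem.Dict.empty)
  let sortedFoods := PySem.List.sorted st.1 (fun x => x) false
  let answer := [["Table"] ++ sortedFoods]
  (PySem.List.sorted st.2.keys (fun x => (PySem.Int.ofStr? x).getD 0) false).foldl
    (fun answer table =>
      answer ++ [sortedFoods.foldl (fun cur food =>
        if (st.2.getD table PySem.Dict.empty).contains food then
          cur ++ [PySem.Int.toStr ((st.2.getD table PySem.Dict.empty).getD food 0)]
        else cur ++ ["0"]) [table]]) answer

-- ===== PORT B =====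
-- the generator unpackings '_, t, f'; on rows of length 3 (all of Pre_) getD 1/2 are exactly t/f
def bTab (row : List String) : String := row.getD 1 ""
def bFood (row : List String) : String := row.getD 2 ""

def displayTable_alt (orders : List (List String)) : List (List String) :=
  let foods := PySem.List.sorted (PySem.Set.ofList (orders.map bFood)) (fun x => x) false
  let tables := PySem.List.sorted (PySem.List.dedup (orders.map bTab))
    (fun x => (PySem.Int.ofStr? x).getD 0) false
  [["Table"] ++ foods] ++ tables.map (fun t =>
    [t] ++ foods.map (fun f =>
      PySem.Int.toStr ((orders.countP (fun r => bTab r == t && bFood r == f) : Int))))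

-- ===== PRECONDITION & SPEC =====
-- Pre_ excludes exactly the inputs on which Python A raises: a row that is not a triple
-- (tuple unpacking raises ValueError) or a table string int() cannot parse (ValueError in the sort key).
def Pre_displayTable (orders : List (List String)) : Prop :=
  ∀ r ∈ orders, r.length = 3 ∧ (PySem.Int.ofStr? (r.getD 1 "")).isSome
instance (orders : List (List String)) : Decidable (Pre_displayTable orders) := by unfold Pre_displayTable; infer_instance

def pvWitness_displayTable : List (List String) :=
  [["1", "3", "Burger"], ["2", "3", "Water"], ["3", "10", "Burger"]]

def Spec_displayTable (orders : List (List String)) (out : List (List String)) : Prop := out = displayTable_alt orders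
instance (orders : List (List String)) (out : List (List String)) : Decidable (Spec_displayTable orders out) := by unfold Spec_displayTable; infer_instance

-- ===== CLAIM (what is proved, stated in full; the proofs are below) =====
def Claim_equal_displayTable : Prop := ∀ (orders : List (List String)), Dom_displayTable orders → Pre_displayTable orders → Spec_displayTable orders (displayTable orders)

-- ===== LEMMAS AND PROOFS =====

lemma keys_aUpdate (tb : PySem.Dict String (PySem.Dict String Int)) (table food : String) :
    (aUpdate tb table food).keys = if tb.contains table then tb.keys else tb.keys ++ [table] := by
  unfold aUpdate
  dsimp only
  by_cases hc : tb.contains table = true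
  · rw [if_pos hc, if_pos hc]
    split_ifs with hf
    · exact PySem.Dict.keys_insert_of_contains _ _ hc
    · rw [PySem.Dict.keys_insert_of_contains _ _ (PySem.Dict.contains_insert_self _ _ _),
        PySem.Dict.keys_insert_of_contains _ _ hc]
  · have hc' : tb.contains table = false := by simpa using hc
    rw [if_neg hc, if_neg hc]
    split_ifs with hf
    · rw [PySem.Dict.keys_insert_of_contains _ _ (PySem.Dict.contains_insert_self _ _ _),
        PySem.Dict.keys_insert_of_not_contains _ _ hc']
    · rw [PySem.Dict.keys_insert_of_contains _ _ (PySem.Dict.contains_insert_self _ _ _),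
        PySem.Dict.keys_insert_of_contains _ _ (PySem.Dict.contains_insert_self _ _ _),
        PySem.Dict.keys_insert_of_not_contains _ _ hc']

lemma getD_aUpdate (tb : PySem.Dict String (PySem.Dict String Int)) (table food t f : String) :
    ((aUpdate tb table food).getD t PySem.Dict.empty).getD f 0 =
      if t = table ∧ f = food then (tb.getD table PySem.Dict.empty).getD food 0 + 1
      else (tb.getD t PySem.Dict.empty).getD f 0 := by
  unfold aUpdate
  dsimp only
  set t1 := if tb.contains table then tb else tb.insert table PySem.Dict.empty with ht1
  have e1 : ∀ u, t1.getD u PySem.Dict.empty = tb.getD u PySem.Dict.empty := by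
    intro u
    rw [ht1]
    split_ifs with hc
    · rfl
    · by_cases hu : u = table
      · subst hu
        rw [PySem.Dict.getD_insert_self, PySem.Dict.getD_of_not_contains _ _ (by simpa using hc)]
      · rw [PySem.Dict.getD_insert_of_ne _ _ _ hu]
  have e2 : ∀ u f', ((if (t1.getD table PySem.Dict.empty).contains food then t1
      else t1.insert table ((t1.getD table PySem.Dict.empty).insert food 0)).getD u
        PySem.Dict.empty).getD f' 0 = (tb.getD u PySem.Dict.empty).getD f' 0 := by
    intro u f'
    split_ifs with hf
    · rw [e1]
    · by_cases hu : u = table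
      · subst hu
        rw [e1, Bool.not_eq_true] at hf
        rw [PySem.Dict.getD_insert_self]
        by_cases hff : f' = food
        · subst hff
          rw [PySem.Dict.getD_insert_self, PySem.Dict.getD_of_not_contains _ 0 hf]
        · rw [PySem.Dict.getD_insert_of_ne _ _ _ hff, e1]
      · rw [PySem.Dict.getD_insert_of_ne _ _ _ hu, e1]
  set t2 := if (t1.getD table PySem.Dict.empty).contains food then t1
    else t1.insert table ((t1.getD table PySem.Dict.empty).insert food 0) with ht2
  by_cases ht : t = table
  · subst ht
    rw [PySem.Dict.getD_insert_self]
    by_cases hff : f = food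
    · subst hff
      rw [PySem.Dict.getD_insert_self, if_pos ⟨rfl, rfl⟩, e2]
    · rw [PySem.Dict.getD_insert_of_ne _ _ _ hff, if_neg (by simp [hff]), e2]
  · rw [PySem.Dict.getD_insert_of_ne _ _ _ ht, if_neg (by simp [ht]), e2]

-- the whole of A's counting fold, characterised against B's staged reading of the orders list
lemma pvFold (l : List (List String)) (sa : PySem.Set String × PySem.Dict String (PySem.Dict String Int))
    (hl : ∀ r ∈ l, r.length = 3) :
    (l.foldl aStep sa).1 = (l.map bFood).foldl PySem.Set.add sa.1 ∧
    (l.foldl aStep sa).2.keys = (l.map bTab).foldl PySem.Set.add sa.2.keys ∧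
    ∀ t f, ((l.foldl aStep sa).2.getD t PySem.Dict.empty).getD f 0
      = (sa.2.getD t PySem.Dict.empty).getD f 0
        + (l.countP (fun r => bTab r == t && bFood r == f) : Int) := by
  induction l generalizing sa with
  | nil => exact ⟨rfl, rfl, fun t f => by simp⟩
  | cons r tl ih =>
    have hr : r.length = 3 := hl r (by simp)
    obtain ⟨a, b, c, hrw⟩ : ∃ a b c, r = [a, b, c] := by
      rcases r with _ | ⟨a, _ | ⟨b, _ | ⟨c, _ | _⟩⟩⟩ <;> simp_all
    subst hrw
    have hstep : aStep sa [a, b, c] = (PySem.Set.add sa.1 c, aUpdate sa.2 b c) := rfl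
    obtain ⟨ih1, ih2, ih3⟩ := ih (aStep sa [a, b, c]) (fun r hm => hl r (by simp [hm]))
    refine ⟨?_, ?_, ?_⟩
    · rw [List.foldl_cons, ih1, hstep]
      rfl
    · rw [List.foldl_cons, ih2, hstep]
      have : (aUpdate sa.2 b c).keys = PySem.Set.add sa.2.keys b := by
        rw [keys_aUpdate]
        unfold PySem.Set.add
        have hcc : PySem.Set.contains sa.2.keys b = sa.2.contains b := by
          simp [PySem.Set.contains, PySem.Dict.contains_eq_decide_mem_keys]
        by_cases hc : sa.2.contains b = true
        · rw [if_pos hc, if_pos (hcc.trans hc)]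
        · rw [if_neg (by simp [hc]), if_neg (by rw [hcc]; exact hc)]
      simp [this, bTab]
    · intro t f
      rw [List.foldl_cons, ih3, hstep]
      dsimp only
      rw [getD_aUpdate]
      have hb : bTab [a, b, c] = b := rfl
      have hc : bFood [a, b, c] = c := rfl
      rw [List.countP_cons]
      by_cases ht : t = b <;> by_cases hf : f = c
      · simp [ht, hf, hb, hc]; ring
      · simp [ht, hf, hb, hc]; exact fun h => hf h.symm
      · simp [ht, hf, hb, hc]; exact fun h => ht h.symm
      · simp [ht, hf, hb, hc]; exact fun h => absurd h.symm ht

-- A's inner row loop, with the membership branch folded away (a missing food prints "0" = str(0))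
lemma rowA_eq (d : PySem.Dict String (PySem.Dict String Int)) (table : String)
    (l : List String) (acc : List String) :
    l.foldl (fun cur food =>
        if (d.getD table PySem.Dict.empty).contains food then
          cur ++ [PySem.Int.toStr ((d.getD table PySem.Dict.empty).getD food 0)]
        else cur ++ ["0"]) acc
      = acc ++ l.map (fun food => PySem.Int.toStr ((d.getD table PySem.Dict.empty).getD food 0)) := by
  refine (PySem.List.foldl_congr_mem' l _
      (fun cur food => cur ++ [PySem.Int.toStr ((d.getD table PySem.Dict.empty).getD food 0)]) acc
      (fun food _ cur => ?_)).trans (PySem.List.foldl_append_singleton_eq_map _ _ _)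
  show (if (d.getD table PySem.Dict.empty).contains food then
      cur ++ [PySem.Int.toStr ((d.getD table PySem.Dict.empty).getD food 0)]
    else cur ++ ["0"])
    = cur ++ [PySem.Int.toStr ((d.getD table PySem.Dict.empty).getD food 0)]
  by_cases hc : (d.getD table PySem.Dict.empty).contains food = true
  · rw [if_pos hc]
  · have hc' : (d.getD table PySem.Dict.empty).contains food = false := by simpa using hc
    rw [if_neg hc, PySem.Dict.getD_of_not_contains (d.getD table PySem.Dict.empty) 0 hc']
    exact congrArg _ (by decide)

-- ===== VERDICT (by name: the statement is the Claim_ definition above) =====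
theorem displayTable_spec : Claim_equal_displayTable := by
  intro orders _ hpre
  unfold Spec_displayTable displayTable displayTable_alt
  obtain ⟨h1, h2, h3⟩ := pvFold orders (PySem.Set.empty, PySem.Dict.empty)
    (fun r hm => (hpre r hm).1)
  simp only [h1, h2, PySem.Dict.keys_empty]
  rw [show List.foldl PySem.Set.add ([] : List String) (orders.map bTab)
      = PySem.Set.ofList (orders.map bTab) from (PySem.Set.ofList_eq_foldl _).symm,
    PySem.List.foldl_append_singleton_eq_map, ← PySem.List.dedup_eq_ofList]
  refine congrArg _ (List.map_congr_left ?_)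
  intro table _
  rw [rowA_eq]
  exact congrArg _ (List.map_congr_left (fun food _ =>
    congrArg PySem.Int.toStr (by rw [h3 table food]; simp)))
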